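-- pv_equiv track=rewrite | github.com/allenai/aries | aries/util/edit.py | basic_token_align
-- ===== SOURCE A (Python) =====
-- import collections
-- import itertools
-- from typing import Iterable, List, Tuple, Union
--
-- def basic_token_align(seq1, seq2, seq2_ignored_ids: Iterable = None):
--     """Aligns the tokens of seq1 and seq2 assuming that seq2 contains all the
--     characters of seq1, but possibly with some extra tokens (e.g., special
--     whitespace markers from a huggingface transformers tokenizer) and possibly
--     partitioned differently.
--
--     In cases where the boundaries are mismatched, this maps to the token with
--     largest overlap, and breaks ties in favor of earlier tokens.
--
--     if seq2_ignored_ids is given, the specified token indexes in seq2 are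
--     ignored and will not be aligned to anything in seq1.
--
--     Returns a tuple (dist, alignment) where dist is the total of mismatches
--     (number of characters that seq2 token boundaries had to be moved to
--     complete alignment) and `alignment` is a list of the same length as seq2
--     containing the indexes of the aligned tokens from seq1 (or None if the
--     token did not overlap seq1 at all)."""
--
--     if seq2_ignored_ids is None:
--         seq2_ignored_ids = set()
--
--     # if seq1[0] == 'numerous':
--     #    breakpoint()
--
--     seq1idxs = list(itertools.chain(*[[(idx, c) for c in tok] for idx, tok in enumerate(seq1)]))
--     seq2idxs = list(itertools.chain(*[[(idx, c) for c in tok] for idx, tok in enumerate(seq2)]))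
--
--     seq2_seq1_char_align = [None] * len(seq2idxs)
--     idx1 = 0
--     last_valid = None
--     for chridx2, (idx2, c2) in enumerate(seq2idxs):
--         if idx1 >= len(seq1idxs):
--             break
--         if c2 == seq1idxs[idx1][1] and idx2 not in seq2_ignored_ids:
--             seq2_seq1_char_align[chridx2] = idx1
--             last_valid = idx1
--             idx1 += 1
--
--     # Ensure that all chars of seq1 were mapped to a char in seq2
--     # if ''.join(seq1) != ''.join(seq2):
--     if last_valid != (len(seq1idxs) - 1):
--         raise ValueError("Cannot align: Sequences didn't contain the same characters")
--
--     # Align the sequences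
--     alignment_counts = {idx: collections.Counter() for idx in range(len(seq2))}
--     # for idx1, idx2 in zip(seq1idxs, seq2idxs):
--     for chridx1, (idx2, c2) in zip(seq2_seq1_char_align, seq2idxs):
--         idx1 = seq1idxs[chridx1][0] if chridx1 is not None else None
--         alignment_counts[idx2][idx1] += 1
--
--     alignments = []
--     n_mismatch_total = 0
--     for idx2 in range(len(seq2)):
--         best_idxs = sorted(
--             alignment_counts[idx2].keys(), reverse=True, key=lambda x: (alignment_counts[idx2][x], -x if x is not None else float("-inf"))
--         )
--         best_idx1 = best_idxs[0]
--         if best_idx1 is None and len(best_idxs) > 1: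
--             best_idx1 = best_idxs[1]
--         n_mismatch_total += sum(alignment_counts[idx2].values()) - alignment_counts[idx2][best_idx1]
--         alignments.append(best_idx1)
--
--     return (n_mismatch_total, alignments)
-- ===== SOURCE B (Python) =====
-- def basic_token_align(seq1, seq2, seq2_ignored_ids=None):
--     """Single forward pointer into the joined seq1 string (with a char->token
--     index table) instead of building (idx,char) pair lists, per-token Counter
--     dicts and a per-token sort; the best seq1 token is picked by one max()."""
--     ignored = seq2_ignored_ids if seq2_ignored_ids is not None else ()
--     s1 = "".join(seq1)
--     tokmap = [i for i, tok in enumerate(seq1) for _ in tok]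
--     ptr = 0
--     n_mismatch = 0
--     alignments = []
--     for idx2, tok in enumerate(seq2):
--         counts = {}
--         if idx2 not in ignored:
--             for c in tok:
--                 if ptr < len(s1) and c == s1[ptr]:
--                     t = tokmap[ptr]
--                     counts[t] = counts.get(t, 0) + 1
--                     ptr += 1
--         if counts:
--             best = max(counts, key=lambda t: (counts[t], -t))
--             n_mismatch += len(tok) - counts[best]
--             alignments.append(best)
--         else:
--             alignments.append(None)
--     if ptr != len(s1) or not s1:
--         raise ValueError("Cannot align: Sequences didn't contain the same characters")
--     return (n_mismatch, alignments)
-- ===== Notes on version B (the rewrite author's own statement) =====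
-- stated objective: faster
-- what changed: B replaces A's (idx,char) pair lists, the preset char-alignment array, the dict of per-token Counters and the per-token sort of counter keys by a single forward pointer into the joined seq1 string with a char-to-token index table, tallying matches per seq2 token as it scans and picking the best seq1 token with one max() (no None key is ever tracked: A's None-then-runner-up rule collapses to 'argmax over matched tokens, None if nothing matched').
import Mathlib
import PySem

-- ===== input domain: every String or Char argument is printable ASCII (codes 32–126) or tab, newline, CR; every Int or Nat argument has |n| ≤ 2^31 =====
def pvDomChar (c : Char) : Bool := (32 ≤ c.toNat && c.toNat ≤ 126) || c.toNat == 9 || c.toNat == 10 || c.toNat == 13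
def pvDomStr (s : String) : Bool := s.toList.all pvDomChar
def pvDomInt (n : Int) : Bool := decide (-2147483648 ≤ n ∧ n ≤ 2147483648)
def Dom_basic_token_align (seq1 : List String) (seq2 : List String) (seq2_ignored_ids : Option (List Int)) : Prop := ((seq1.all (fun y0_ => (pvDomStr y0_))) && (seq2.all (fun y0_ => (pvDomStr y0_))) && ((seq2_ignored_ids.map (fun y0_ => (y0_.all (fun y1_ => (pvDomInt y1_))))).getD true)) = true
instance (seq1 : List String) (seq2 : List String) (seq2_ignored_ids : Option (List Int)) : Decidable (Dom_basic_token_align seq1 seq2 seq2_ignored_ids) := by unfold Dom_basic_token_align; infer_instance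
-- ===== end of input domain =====

-- B replaces A's (idx,char) pair lists, per-token Counters and per-token sort by a single
-- forward pointer into the joined seq1 chars plus a char->token table and one max per token
-- (objective: faster by constant factor).

-- ===== PORT A =====

-- [[(idx, c) for c in tok] for idx, tok in enumerate(seq)], chained
def pvCharIdxs (seq : List String) : List (Int × Char) :=
  (PySem.List.enumerate seq).flatMap (fun p => p.2.toList.map (fun c => (p.1, c)))

-- the phase-1 'for chridx2, (idx2, c2) in enumerate(seq2idxs)' loop; returns
-- (seq2_seq1_char_align, idx1, last_valid); on break the preset None entries remain
def pvAlignLoop (s1 : List (Int × Char)) (ign : List Int) :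
    List (Int × Char) → Int → Option Int → List (Option Int) × Int × Option Int
  | [], i1, lv => ([], i1, lv)
  | q :: rest, i1, lv =>
    if PySem.List.len s1 ≤ i1 then
      ((q :: rest).map (fun _ => (none : Option Int)), i1, lv)
    else if ((PySem.List.pyGet? s1 i1).map Prod.snd == some q.2) && !(ign.contains q.1) then
      let r := pvAlignLoop s1 ign rest (i1 + 1) (some i1)
      (some i1 :: r.1, r.2)
    else
      let r := pvAlignLoop s1 ign rest i1 lv
      (none :: r.1, r.2)

def basic_token_align (seq1 : List String) (seq2 : List String) (seq2_ignored_ids : Option (List Int)) : Int × List (Option Int) :=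
  let ign := seq2_ignored_ids.getD []          -- 'if seq2_ignored_ids is None: ... = set()'
  let s1idxs := pvCharIdxs seq1
  let s2idxs := pvCharIdxs seq2
  let r := pvAlignLoop s1idxs ign s2idxs 0 none
  if r.2.2 ≠ some (PySem.List.len s1idxs - 1) then (0, [])   -- Python: raise ValueError (excluded by Pre_)
  else
    -- alignment_counts = {idx: Counter() for idx in range(len(seq2))}
    let counts0 : PySem.Dict Int (PySem.Dict (Option Int) Int) :=
      (PySem.List.pyRange 0 (PySem.List.len seq2) 1).foldl
        (fun d i => d.insert i PySem.Dict.empty) PySem.Dict.empty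
    -- for chridx1, (idx2, c2) in zip(...): alignment_counts[idx2][seq1idxs[chridx1][0] or None] += 1
    let counts := (r.1.zip s2idxs).foldl (fun d p =>
        -- chridx1 is always a valid index of s1idxs, so the pyGetD default is never read
        let k : Option Int := p.1.map (fun ch => (PySem.List.pyGetD s1idxs ch (0, ' ')).1)
        d.modify p.2.1 PySem.Dict.empty (fun c => c.modify k 0 (· + 1))) counts0
    (PySem.List.pyRange 0 (PySem.List.len seq2) 1).foldl (fun acc i2 =>
        let c := counts.getD i2 PySem.Dict.empty
        -- sorted(keys, reverse=True, key=lambda x: (count, -x or float('-inf'))); the tuple key is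
        -- the lexicographic Int ×ₗ Int, with float('-inf') modelled by -len(seq1)-1, exact because
        -- every non-None key is a seq1 token index in [0, len(seq1))
        let best_idxs := PySem.List.sorted c.keys
          (fun x => toLex ((c.getD x 0 : Int),
            (match x with | none => -(PySem.List.len seq1) - 1 | some v => -v))) true
        let b0 := PySem.List.pyGetD best_idxs 0 none   -- best_idxs[0]; [] = Python IndexError (excluded by Pre_)
        let best := if b0 = none ∧ 1 < best_idxs.length then PySem.List.pyGetD best_idxs 1 none else b0
        (acc.1 + (c.values.sum - c.getD best 0), acc.2 ++ [best]))
      ((0 : Int), ([] : List (Option Int)))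

-- ===== PORT B =====

-- the inner 'for c in tok' loop of Source B: tally matched seq1 token ids, advance ptr
def pvScanTok (s1 : List Char) (tm : List Int) :
    List Char → Int → PySem.Dict Int Int → PySem.Dict Int Int × Int
  | [], p, d => (d, p)
  | c :: cs, p, d =>
    -- 'ptr < len(s1) and c == s1[ptr]': pyGet? is some exactly then, since ptr only counts up from 0
    if PySem.List.pyGet? s1 p == some c then
      let t := PySem.List.pyGetD tm p 0
      pvScanTok s1 tm cs (p + 1) (d.insert t (d.getD t 0 + 1))
    else
      pvScanTok s1 tm cs p d

def basic_token_align_alt (seq1 : List String) (seq2 : List String) (seq2_ignored_ids : Option (List Int)) : Int × List (Option Int) :=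
  let ignored := seq2_ignored_ids.getD []
  let s1 := seq1.flatMap (fun t => t.toList)    -- ''.join(seq1), as its list of chars
  let tokmap := (PySem.List.enumerate seq1).flatMap (fun p => p.2.toList.map (fun _ => p.1))
  let r := (PySem.List.enumerate seq2).foldl (fun st q =>
      let dp := if ignored.contains q.1 then ((PySem.Dict.empty : PySem.Dict Int Int), st.2.2)
                else pvScanTok s1 tokmap q.2.toList st.2.2 PySem.Dict.empty
      -- 'if counts: best = max(counts, key=lambda t: (counts[t], -t))' — lexicographic tuple key
      match PySem.List.max? dp.1.keys (fun t => toLex (dp.1.getD t 0, -t)) with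
      | some best => (st.1 + (PySem.Str.len q.2 - dp.1.getD best 0), st.2.1 ++ [some best], dp.2)
      | none => (st.1, st.2.1 ++ [(none : Option Int)], dp.2))
    ((0 : Int), ([] : List (Option Int)), (0 : Int))
  if r.2.2 = PySem.List.len s1 ∧ s1 ≠ [] then (r.1, r.2.1)
  else (0, [])   -- Python: raise ValueError (excluded by Pre_)

-- ===== PRECONDITION & SPEC =====

-- Pre_ excludes exactly the inputs on which A raises: the ValueError when the joined seq1 is
-- empty or is not a subsequence of seq2's non-ignored characters (A's greedy char matching
-- completes iff it is a subsequence), and the IndexError on an empty seq2 token.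
def Pre_basic_token_align (seq1 : List String) (seq2 : List String) (seq2_ignored_ids : Option (List Int)) : Prop :=
  seq1.flatMap (fun t => t.toList) ≠ [] ∧
  List.Sublist (seq1.flatMap (fun t => t.toList))
    ((PySem.List.enumerate seq2).flatMap
      (fun q => if (seq2_ignored_ids.getD []).contains q.1 then [] else q.2.toList)) ∧
  ∀ t ∈ seq2, t ≠ ""
instance (seq1 : List String) (seq2 : List String) (seq2_ignored_ids : Option (List Int)) : Decidable (Pre_basic_token_align seq1 seq2 seq2_ignored_ids) := by unfold Pre_basic_token_align; infer_instance

def pvWitness_basic_token_align : List String × List String × Option (List Int) := (["ab"], ["a", "b"], none)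

def Spec_basic_token_align (seq1 : List String) (seq2 : List String) (seq2_ignored_ids : Option (List Int)) (out : Int × List (Option Int)) : Prop := out = basic_token_align_alt seq1 seq2 seq2_ignored_ids
instance (seq1 : List String) (seq2 : List String) (seq2_ignored_ids : Option (List Int)) (out : Int × List (Option Int)) : Decidable (Spec_basic_token_align seq1 seq2 seq2_ignored_ids out) := by unfold Spec_basic_token_align; infer_instance

-- ===== CLAIM (what is proved, stated in full; the proofs are below) =====
def Claim_equal_basic_token_align : Prop := ∀ (seq1 : List String) (seq2 : List String) (seq2_ignored_ids : Option (List Int)), Dom_basic_token_align seq1 seq2 seq2_ignored_ids → Pre_basic_token_align seq1 seq2 seq2_ignored_ids → Spec_basic_token_align seq1 seq2 seq2_ignored_ids (basic_token_align seq1 seq2 seq2_ignored_ids)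

-- ===== LEMMAS AND PROOFS =====

-- Proof-side reference: a per-token greedy scan with one pointer, the data both ports compute.

-- greedy char matching of one token against s from position p: per-char matched position (or none)
-- and the final position
def pvGMatch (s : List Char) : List Char → Nat → List (Option Nat) × Nat
  | [], p => ([], p)
  | c :: cs, p =>
    if s[p]? = some c then
      let r := pvGMatch s cs (p + 1)
      (some p :: r.1, r.2)
    else
      let r := pvGMatch s cs p
      (none :: r.1, r.2)

-- the value a token contributes: argmax over matched seq1 tokens (count, then earlier index)
def pvPick (tm : List Int) (L : Nat) (opts : List (Option Nat)) : Int × Option Int :=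
  let ms := (opts.filterMap id).map (fun q => tm.getD q 0)
  match PySem.List.max? (PySem.Set.ofList ms) (fun t => toLex ((ms.count t : Int), -t)) with
  | some b => ((L : Int) - ms.count b, some b)
  | none => (0, none)

-- whole-input reference: (total mismatch, alignments, per-token matched-position lists, final pointer)
def pvRef (s1c : List Char) (tm : List Int) (ign : List Int) :
    List String → Int → Nat → Int × List (Option Int) × List (List (Option Nat)) × Nat
  | [], _, p => (0, [], [], p)
  | t :: rest, j, p =>
    let g := if ign.contains j then (t.toList.map (fun _ => (none : Option Nat)), p)
             else pvGMatch s1c t.toList p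
    let pk := pvPick tm g.1.length g.1
    let r := pvRef s1c tm ign rest (j + 1) g.2
    (pk.1 + r.1, pk.2 :: r.2.1, g.1 :: r.2.2.1, r.2.2.2)

-- ---- structure of pvCharIdxs ----

lemma pvCharIdxs_snd (seq : List String) (s : Int) :
    ((PySem.List.enumerate seq s).flatMap (fun p => p.2.toList.map (fun c => (p.1, c)))).map Prod.snd
      = seq.flatMap (fun t => t.toList) := by
  induction seq generalizing s with
  | nil => simp [PySem.List.enumerate_nil]
  | cons t rest ih => simp [PySem.List.enumerate_cons, ih, List.map_map]

lemma pvCharIdxs_fst (seq : List String) (s : Int) :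
    ((PySem.List.enumerate seq s).flatMap (fun p => p.2.toList.map (fun c => (p.1, c)))).map Prod.fst
      = (PySem.List.enumerate seq s).flatMap (fun p => p.2.toList.map (fun _ => p.1)) := by
  induction seq generalizing s with
  | nil => simp [PySem.List.enumerate_nil]
  | cons t rest ih => simp [PySem.List.enumerate_cons, ih, List.map_map]

lemma pvCharIdxs_length (seq : List String) :
    (pvCharIdxs seq).length = (seq.flatMap (fun t => t.toList)).length := by
  have h := pvCharIdxs_snd seq 0
  have := congrArg List.length h
  simpa [pvCharIdxs] using this

-- ---- pvGMatch facts ----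

lemma pvGMatch_length (s : List Char) (cs : List Char) (p : Nat) :
    (pvGMatch s cs p).1.length = cs.length := by
  induction cs generalizing p with
  | nil => simp [pvGMatch]
  | cons c cs ih => by_cases h : s[p]? = some c <;> simp [pvGMatch, h, ih]

lemma pvGMatch_stuck (s : List Char) (cs : List Char) (p : Nat) (h : s.length ≤ p) :
    pvGMatch s cs p = (cs.map (fun _ => none), p) := by
  induction cs generalizing p with
  | nil => simp [pvGMatch]
  | cons c cs ih =>
    have hn : s[p]? = none := by rw [List.getElem?_eq_none_iff]; omega
    simp [pvGMatch, hn, ih p h]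

lemma pvGMatch_ptr_le (s : List Char) (cs : List Char) (p : Nat) (h : p ≤ s.length) :
    (pvGMatch s cs p).2 ≤ s.length := by
  induction cs generalizing p with
  | nil => simpa [pvGMatch] using h
  | cons c cs ih =>
    by_cases hg : s[p]? = some c
    · have hlt : p < s.length := by
        by_contra hc
        rw [List.getElem?_eq_none_iff.mpr (by omega)] at hg; simp at hg
      simpa [pvGMatch, hg] using ih (p + 1) (by omega)
    · simpa [pvGMatch, hg] using ih p h

lemma pvGMatch_mem_lt (s : List Char) (cs : List Char) (p q : Nat)
    (h : some q ∈ (pvGMatch s cs p).1) : q < s.length := by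
  induction cs generalizing p with
  | nil => simp [pvGMatch] at h
  | cons c cs ih =>
    by_cases hg : s[p]? = some c
    · simp only [pvGMatch, if_pos hg, List.mem_cons] at h
      rcases h with h1 | h2
      · have : p < s.length := by
          by_contra hc
          rw [List.getElem?_eq_none_iff.mpr (by omega)] at hg; simp at hg
        have : q = p := by simpa using h1
        omega
      · exact ih (p + 1) h2
    · simp only [pvGMatch, if_neg hg, List.mem_cons] at h
      rcases h with h1 | h2
      · simp at h1
      · exact ih p h2

lemma pvGMatch_sublist (s : List Char) (cs r : List Char) (p : Nat) (hp : p ≤ s.length)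
    (h : (s.drop p).Sublist (cs ++ r)) : (s.drop (pvGMatch s cs p).2).Sublist r := by
  induction cs generalizing p with
  | nil => simpa [pvGMatch] using h
  | cons c cs ih =>
    by_cases hg : s[p]? = some c
    · have hlt : p < s.length := by
        by_contra hc
        rw [List.getElem?_eq_none_iff.mpr (by omega)] at hg; simp at hg
      have hdrop : s.drop p = c :: s.drop (p + 1) := by
        rw [List.drop_eq_getElem_cons hlt]
        simp [List.getElem?_eq_getElem hlt] at hg
        simp [hg]
      rw [hdrop] at h
      have h' : (s.drop (p + 1)).Sublist (cs ++ r) := by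
        have h2 : (c :: s.drop (p + 1)).Sublist (c :: (cs ++ r)) := by simpa using h
        exact List.cons_sublist_cons.mp h2
      simpa [pvGMatch, hg] using ih (p + 1) (by omega) h'
    · rcases Nat.lt_or_ge p s.length with hlt | hge
      · have hdrop : s.drop p = s[p] :: s.drop (p + 1) := List.drop_eq_getElem_cons hlt
        have hne : s[p] ≠ c := by
          intro hcontra; exact hg (by simp [List.getElem?_eq_getElem hlt, hcontra])
        have h' : (s.drop p).Sublist (cs ++ r) := by
          rw [hdrop] at h ⊢
          cases h with
          | cons _ htail => exact htail
          | cons₂ _ _ => exact absurd rfl hne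
        simpa [pvGMatch, hg] using ih p hp h'
      · rw [pvGMatch_stuck s (c :: cs) p hge]
        have : s.drop p = [] := List.drop_eq_nil_of_le hge
        simp [this]

-- ---- pvAlignLoop facts ----

lemma pvAlignLoop_stuck (s1 : List (Int × Char)) (ign : List Int) (xs : List (Int × Char))
    (i1 : Int) (lv : Option Int) (h : PySem.List.len s1 ≤ i1) :
    pvAlignLoop s1 ign xs i1 lv = (xs.map (fun _ => none), i1, lv) := by
  cases xs with
  | nil => simp [pvAlignLoop]
  | cons q rest =>
    simp only [pvAlignLoop, if_pos h]

lemma pvAlignLoop_append (s1 : List (Int × Char)) (ign : List Int) (xs ys : List (Int × Char))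
    (i1 : Int) (lv : Option Int) :
    pvAlignLoop s1 ign (xs ++ ys) i1 lv =
      ((pvAlignLoop s1 ign xs i1 lv).1 ++
        (pvAlignLoop s1 ign ys (pvAlignLoop s1 ign xs i1 lv).2.1 (pvAlignLoop s1 ign xs i1 lv).2.2).1,
       (pvAlignLoop s1 ign ys (pvAlignLoop s1 ign xs i1 lv).2.1 (pvAlignLoop s1 ign xs i1 lv).2.2).2) := by
  induction xs generalizing i1 lv with
  | nil => simp [pvAlignLoop]
  | cons q rest ih =>
    by_cases hb : PySem.List.len s1 ≤ i1
    · rw [pvAlignLoop_stuck s1 ign (q :: rest ++ ys) i1 lv hb,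
          pvAlignLoop_stuck s1 ign (q :: rest) i1 lv hb,
          pvAlignLoop_stuck s1 ign ys i1 lv hb]
      simp
    · by_cases hm : (((PySem.List.pyGet? s1 i1).map Prod.snd == some q.2) && !(ign.contains q.1)) = true
      · simp only [List.cons_append, pvAlignLoop, if_neg hb, if_pos hm, ih]
      · simp only [List.cons_append, pvAlignLoop, if_neg hb, if_neg hm, ih]

lemma pvAlignLoop_lv (s1 : List (Int × Char)) (ign : List Int) (xs : List (Int × Char))
    (i1 : Int) (lv : Option Int) (h0 : 0 ≤ i1)
    (h : lv = if i1 = 0 then none else some (i1 - 1)) :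
    (pvAlignLoop s1 ign xs i1 lv).2.2 =
      (if (pvAlignLoop s1 ign xs i1 lv).2.1 = 0 then none else some ((pvAlignLoop s1 ign xs i1 lv).2.1 - 1))
    ∧ 0 ≤ (pvAlignLoop s1 ign xs i1 lv).2.1 := by
  induction xs generalizing i1 lv with
  | nil => exact ⟨h, h0⟩
  | cons q rest ih =>
    by_cases hb : PySem.List.len s1 ≤ i1
    · rw [pvAlignLoop_stuck s1 ign (q :: rest) i1 lv hb]; exact ⟨h, h0⟩
    · by_cases hm : (((PySem.List.pyGet? s1 i1).map Prod.snd == some q.2) && !(ign.contains q.1)) = true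
      · simp only [pvAlignLoop, if_neg hb, if_pos hm]
        exact ih (i1 + 1) (some i1) (by omega) (by simp; omega)
      · simp only [pvAlignLoop, if_neg hb, if_neg hm]
        exact ih i1 lv h0 h

lemma pvAlignLoop_block_ignored (s1 : List (Int × Char)) (ign : List Int) (j : Int)
    (cs : List Char) (i1 : Int) (lv : Option Int) (h : ign.contains j = true) :
    pvAlignLoop s1 ign (cs.map (fun c => (j, c))) i1 lv = (cs.map (fun _ => none), i1, lv) := by
  induction cs generalizing i1 lv with
  | nil => simp [pvAlignLoop]
  | cons c cs ih =>
    by_cases hb : PySem.List.len s1 ≤ i1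
    · rw [pvAlignLoop_stuck _ _ _ _ _ hb]
      rw [List.map_map]
      simp [Function.comp_def, List.map_const']
    · simp only [List.map_cons, pvAlignLoop, if_neg hb, h, Bool.not_true, Bool.and_false,
        Bool.false_eq_true, if_neg, ih]
      simp

lemma pvAlignLoop_block (s1 : List (Int × Char)) (s1c : List Char) (ign : List Int) (j : Int)
    (hsnd : s1.map Prod.snd = s1c) (hj : ign.contains j = false) (cs : List Char) (p : Nat)
    (lv : Option Int) :
    (pvAlignLoop s1 ign (cs.map (fun c => (j, c))) (p : Int) lv).1
        = (pvGMatch s1c cs p).1.map (fun o => o.map (fun q => (q : Int)))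
    ∧ (pvAlignLoop s1 ign (cs.map (fun c => (j, c))) (p : Int) lv).2.1
        = ((pvGMatch s1c cs p).2 : Int) := by
  have hlen : s1c.length = s1.length := by rw [← hsnd]; simp
  induction cs generalizing p lv with
  | nil => simp [pvAlignLoop, pvGMatch]
  | cons c cs ih =>
    have hget : s1c[p]? = (PySem.List.pyGet? s1 (p : Int)).map Prod.snd := by
      rw [PySem.List.pyGet?_natCast, ← hsnd, List.getElem?_map]
    by_cases hb : s1.length ≤ p
    · rw [pvAlignLoop_stuck s1 ign _ _ _ (by simp [PySem.List.len_eq]; omega),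
          pvGMatch_stuck s1c _ p (by omega)]
      constructor
      · rw [List.map_map, List.map_map]; simp [Function.comp_def]
      · rfl
    · have hblt : ¬ (PySem.List.len s1 ≤ (p : Int)) := by simp [PySem.List.len_eq]; omega
      by_cases hm : s1c[p]? = some c
      · have hcond : (((PySem.List.pyGet? s1 (p : Int)).map Prod.snd == some c)
            && !(ign.contains j)) = true := by
          have hjm : j ∉ ign := by simpa using hj
          rw [← hget]; simp [hm, hjm]
        have hcast : ((p : Int) + 1) = ((p + 1 : Nat) : Int) := by push_cast; ring
        have h1 := (ih (p + 1) (some (p : Int))).1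
        have h2 := (ih (p + 1) (some (p : Int))).2
        simp only [List.map_cons, pvAlignLoop, if_neg hblt, hcond, pvGMatch, if_pos hm]
        exact ⟨by simpa using h1, by simpa using h2⟩
      · have hcond : (((PySem.List.pyGet? s1 (p : Int)).map Prod.snd == some c)
            && !(ign.contains j)) = false := by
          rw [← hget]; simp; intro hc; exact absurd hc hm
        have h1 := (ih p lv).1
        have h2 := (ih p lv).2
        simp only [List.map_cons, pvAlignLoop, if_neg hblt, hcond, Bool.false_eq_true, if_neg,
          pvGMatch, if_neg hm]
        exact ⟨by simpa using h1, by simpa using h2⟩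

-- phase-1 loop over the whole flattened seq2 = the reference per-token scans
lemma pvAlign_full (s1 : List (Int × Char)) (s1c : List Char) (tm ign : List Int)
    (hsnd : s1.map Prod.snd = s1c) :
    ∀ (seq2' : List String) (s : Int) (p : Nat) (lv : Option Int),
    (pvAlignLoop s1 ign ((PySem.List.enumerate seq2' s).flatMap (fun q => q.2.toList.map (fun c => (q.1, c)))) (p : Int) lv).1
        = (pvRef s1c tm ign seq2' s p).2.2.1.flatten.map (fun o => o.map (fun q => (q : Int)))
    ∧ (pvAlignLoop s1 ign ((PySem.List.enumerate seq2' s).flatMap (fun q => q.2.toList.map (fun c => (q.1, c)))) (p : Int) lv).2.1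
        = ((pvRef s1c tm ign seq2' s p).2.2.2 : Int) := by
  intro seq2'
  induction seq2' with
  | nil =>
    intro s p lv
    simp [PySem.List.enumerate_nil, pvAlignLoop, pvRef]
  | cons t rest ih =>
    intro s p lv
    rw [PySem.List.enumerate_cons]
    simp only [List.flatMap_cons]
    rw [pvAlignLoop_append]
    by_cases hj : ign.contains s
    · have hblk := pvAlignLoop_block_ignored s1 ign s t.toList (p : Int) lv hj
      rw [hblk]
      simp only [pvRef, hj, if_true]
      constructor
      · simp only [List.flatten_cons, List.map_append]
        rw [(ih (s + 1) p lv).1]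
        simp [List.map_map, Function.comp_def]
      · exact (ih (s + 1) p lv).2
    · have hjf : ign.contains s = false := by simpa using hj
      have hblk := pvAlignLoop_block s1 s1c ign s hsnd hjf t.toList p lv
      simp only [pvRef, hjf, Bool.false_eq_true, if_false]
      constructor
      · simp only [List.flatten_cons, List.map_append]
        rw [hblk.1, hblk.2]
        congr 1
        rw [(ih (s + 1) (pvGMatch s1c t.toList p).2 ((pvAlignLoop s1 ign (t.toList.map (fun c => (s, c))) (↑p) lv).2.2)).1]
      · rw [hblk.2]
        exact (ih (s + 1) (pvGMatch s1c t.toList p).2 _).2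

-- ---- dict-of-counters characterization ----

lemma pvCounts0_getD (l : List Int) (j : Int) :
    ((l.foldl (fun d i => d.insert i (PySem.Dict.empty : PySem.Dict (Option Int) Int)) PySem.Dict.empty).getD j PySem.Dict.empty)
      = PySem.Dict.empty := by
  suffices h : ∀ (d : PySem.Dict Int (PySem.Dict (Option Int) Int)),
      (∀ k, d.getD k PySem.Dict.empty = PySem.Dict.empty) →
      ((l.foldl (fun d i => d.insert i PySem.Dict.empty) d).getD j PySem.Dict.empty) = PySem.Dict.empty by
    exact h _ (fun k => by simp [PySem.Dict.getD_empty])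
  induction l with
  | nil => intro d hd; exact hd j
  | cons x xs ih =>
    intro d hd
    simp only [List.foldl_cons]
    refine ih _ (fun k => ?_)
    rw [PySem.Dict.getD_insert]
    split <;> simp [hd]

lemma pvGetD_foldl_modify2 (f : Option Int → Option Int) (l : List (Option Int × (Int × Char)))
    (d : PySem.Dict Int (PySem.Dict (Option Int) Int)) (i : Int) :
    (l.foldl (fun d p => d.modify p.2.1 PySem.Dict.empty (fun c => c.modify (f p.1) 0 (· + 1))) d).getD i PySem.Dict.empty
      = ((l.filter (fun p => p.2.1 == i)).map (fun p => f p.1)).foldl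
          (fun c k => c.modify k 0 (· + 1)) (d.getD i PySem.Dict.empty) := by
  induction l generalizing d with
  | nil => simp
  | cons x xs ih =>
    simp only [List.foldl_cons, List.filter_cons]
    by_cases hk : x.2.1 = i
    · rw [hk]
      simp only [BEq.rfl, if_pos]
      rw [ih, PySem.Dict.getD_modify, if_pos rfl]
      rw [List.map_cons, List.foldl_cons]
    · have hb : (x.2.1 == i) = false := by simpa using hk
      simp only [hb, Bool.false_eq_true, if_false]
      rw [ih, PySem.Dict.getD_modify, if_neg (fun hc => hk hc.symm)]

-- the zip of the char-alignment with seq2's (idx, char) pairs, filtered to one token, is that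
-- token's matched-position list
lemma pvZip_filter (s1c : List Char) (tm ign : List Int) :
    ∀ (seq2' : List String) (s : Int) (p : Nat) (i2 : Int),
    ((((pvRef s1c tm ign seq2' s p).2.2.1.flatten.map (fun o => o.map (fun q => (q : Int)))).zip
        ((PySem.List.enumerate seq2' s).flatMap (fun q => q.2.toList.map (fun c => (q.1, c))))).filter
          (fun q => q.2.1 == i2)).map (fun q => q.1)
      = if s ≤ i2 ∧ i2 < s + (seq2'.length : Int) then
          ((pvRef s1c tm ign seq2' s p).2.2.1.getD (i2 - s).toNat []).map (fun o => o.map (fun q => (q : Int)))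
        else [] := by
  intro seq2'
  induction seq2' with
  | nil =>
    intro s p i2
    rw [if_neg (by intro h; simp at h; omega)]
    simp [pvRef, PySem.List.enumerate_nil]
  | cons t rest ih =>
    intro s p i2
    rw [PySem.List.enumerate_cons]
    simp only [pvRef, List.flatMap_cons]
    -- the head block: its zip keys are all s
    have hblock : ∀ (os : List (Option Nat)) (p' : Nat), os.length = t.toList.length →
        ((((os :: (pvRef s1c tm ign rest (s + 1) p').2.2.1).flatten.map (fun o => o.map (fun q => (q : Int)))).zip
          (t.toList.map (fun c => (s, c)) ++ (PySem.List.enumerate rest (s + 1)).flatMap (fun q => q.2.toList.map (fun c => (q.1, c))))).filter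
            (fun q => q.2.1 == i2)).map (fun q => q.1)
        = (if i2 = s then os.map (fun o => o.map (fun q => (q : Int))) else []) ++
          ((((pvRef s1c tm ign rest (s + 1) p').2.2.1.flatten.map (fun o => o.map (fun q => (q : Int)))).zip
            ((PySem.List.enumerate rest (s + 1)).flatMap (fun q => q.2.toList.map (fun c => (q.1, c))))).filter
              (fun q => q.2.1 == i2)).map (fun q => q.1) := by
      intro os p' hoslen
      rw [List.flatten_cons, List.map_append,
          List.zip_append (by simp [hoslen]), List.filter_append, List.map_append]
      congr 1
      by_cases hi : i2 = s
      · subst hi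
        rw [if_pos rfl]
        have hkeep : ((os.map (fun o => o.map (fun q => (q : Int)))).zip
            (t.toList.map (fun c => (i2, c)))).filter (fun q => q.2.1 == i2)
            = (os.map (fun o => o.map (fun q => (q : Int)))).zip (t.toList.map (fun c => (i2, c))) := by
          apply List.filter_eq_self.mpr
          intro a ha
          have h2 := (List.of_mem_zip ha).2
          simp only [List.mem_map] at h2
          obtain ⟨c, _, hc⟩ := h2
          rw [← hc]
          simp
        rw [hkeep, List.map_fst_zip (by simp [hoslen])]
      · rw [if_neg hi]
        apply List.map_eq_nil_iff.mpr
        apply List.filter_eq_nil_iff.mpr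
        intro a ha
        have h2 := (List.of_mem_zip ha).2
        simp only [List.mem_map] at h2
        obtain ⟨c, _, hc⟩ := h2
        rw [← hc]
        simp
        omega
    by_cases hj : ign.contains s
    · simp only [hj, if_pos]
      rw [hblock _ p (by simp)]
      rw [ih (s + 1) p i2]
      by_cases hi : i2 = s
      · subst hi
        rw [if_pos rfl, if_neg (by push_cast; omega), List.append_nil,
            if_pos (by simp only [List.length_cons]; push_cast; omega)]
        have hz : (i2 - i2).toNat = 0 := by omega
        rw [hz]
        simp
      · rw [if_neg hi, List.nil_append]
        by_cases hin : s ≤ i2 ∧ i2 < s + ((t :: rest).length : Int)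
        · have hin' : s + 1 ≤ i2 ∧ i2 < s + 1 + (rest.length : Int) := by
            simp only [List.length_cons] at hin; push_cast at hin ⊢; omega
          rw [if_pos hin', if_pos hin]
          have hsucc : (i2 - s).toNat = (i2 - (s + 1)).toNat + 1 := by omega
          rw [hsucc]
          simp
        · have hin' : ¬ (s + 1 ≤ i2 ∧ i2 < s + 1 + (rest.length : Int)) := by
            simp only [List.length_cons] at hin; push_cast at hin ⊢; omega
          rw [if_neg hin', if_neg hin]
    · simp only [hj, Bool.false_eq_true, if_false]
      rw [hblock _ (pvGMatch s1c t.toList p).2 (pvGMatch_length s1c t.toList p)]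
      rw [ih (s + 1) (pvGMatch s1c t.toList p).2 i2]
      by_cases hi : i2 = s
      · subst hi
        rw [if_pos rfl, if_neg (by push_cast; omega), List.append_nil,
            if_pos (by simp only [List.length_cons]; push_cast; omega)]
        have hz : (i2 - i2).toNat = 0 := by omega
        rw [hz]
        simp
      · rw [if_neg hi, List.nil_append]
        by_cases hin : s ≤ i2 ∧ i2 < s + ((t :: rest).length : Int)
        · have hin' : s + 1 ≤ i2 ∧ i2 < s + 1 + (rest.length : Int) := by
            simp only [List.length_cons] at hin; push_cast at hin ⊢; omega
          rw [if_pos hin', if_pos hin]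
          have hsucc : (i2 - s).toNat = (i2 - (s + 1)).toNat + 1 := by omega
          rw [hsucc]
          simp
        · have hin' : ¬ (s + 1 ≤ i2 ∧ i2 < s + 1 + (rest.length : Int)) := by
            simp only [List.length_cons] at hin; push_cast at hin ⊢; omega
          rw [if_neg hin', if_neg hin]

-- ---- per-token best-pick: sorted keys + None-fallback = single argmax over matched tokens ----

lemma pvCount_some (f : Nat → Int) (opts : List (Option Nat)) (t : Int) :
    (opts.map (fun o => o.map f)).count (some t) = ((opts.filterMap id).map f).count t := by
  induction opts with
  | nil => simp
  | cons o os ih =>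
    cases o with
    | none => simpa [List.count_cons] using ih
    | some q => simp [List.count_cons, ih]

lemma pvSum_ite_one (k : Option Int) (S : List (Option Int)) (hS : S.Nodup) (hk : k ∈ S) :
    (S.map (fun x => if x = k then (1 : Int) else 0)).sum = 1 := by
  induction S with
  | nil => simp at hk
  | cons a as ih =>
    rw [List.map_cons, List.sum_cons]
    rcases List.mem_cons.mp hk with rfl | h
    · rw [if_pos rfl]
      have hnotin : k ∉ as := (List.nodup_cons.mp hS).1
      have hz : (as.map (fun x => if x = k then (1 : Int) else 0)).sum = 0 := by
        apply List.sum_eq_zero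
        intro y hy
        obtain ⟨x, hx, hxy⟩ := List.mem_map.mp hy
        rw [← hxy, if_neg (fun hc : x = k => hnotin (hc ▸ hx))]
      rw [hz]
      ring
    · have hne : a ≠ k := fun hc => (List.nodup_cons.mp hS).1 (hc ▸ h)
      rw [if_neg hne, ih (List.nodup_cons.mp hS).2 h]
      ring

lemma pvSum_counts (S : List (Option Int)) (hS : S.Nodup) :
    ∀ ks : List (Option Int), (∀ k ∈ ks, k ∈ S) →
    (S.map (fun k => (ks.count k : Int))).sum = ks.length := by
  intro ks
  induction ks with
  | nil => intro _; simp
  | cons k ks ih =>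
    intro hmem
    have hk : k ∈ S := hmem k List.mem_cons_self
    have ih' := ih (fun x hx => hmem x (List.mem_cons_of_mem _ hx))
    have hpt : ∀ x ∈ S, (((k :: ks).count x : Nat) : Int)
        = ((ks.count x : Nat) : Int) + (if x = k then (1 : Int) else 0) := by
      intro x hx
      rw [List.count_cons]
      by_cases hxk : x = k
      · rw [if_pos hxk]
        have hb : (k == x) = true := by simp [hxk]
        simp [hb]
      · rw [if_neg hxk]
        have hb : (k == x) = false := by simp; exact fun hc => hxk hc.symm
        simp [hb]
    rw [List.map_congr_left hpt, List.sum_map_add, ih', pvSum_ite_one k S hS hk]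
    simp

lemma pvAllNone_ofList (ks : List (Option Int)) (h : ∀ x ∈ ks, x = (none : Option Int)) :
    PySem.Set.ofList ks = if ks = [] then [] else [none] := by
  induction ks with
  | nil => simp [PySem.Set.ofList_nil]
  | cons k ks ih =>
    have hk : k = none := h k List.mem_cons_self
    subst hk
    rw [PySem.Set.ofList_cons, ih (fun x hx => h x (List.mem_cons_of_mem _ hx))]
    by_cases hks : ks = []
    · simp [hks, PySem.Set.discard]
    · simp only [hks, if_neg, if_false]
      simp [PySem.Set.discard]

lemma pvPyGetD_one (x y : Option Int) (l : List (Option Int)) :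
    PySem.List.pyGetD (x :: y :: l) 1 none = y := by
  simp [pysem]

lemma pvCounter_values_sum (ks : List (Option Int)) :
    ((PySem.Dict.counter ks).values).sum = (ks.length : Int) := by
  have hitems := PySem.Dict.items_counter (xs := ks)
  have hvals : (PySem.Dict.counter ks).values = (PySem.Set.ofList ks).map (fun k => (ks.count k : Int)) := by
    have : (PySem.Dict.counter ks).values = ((PySem.Dict.counter ks).items).map (fun p => p.2) := rfl
    rw [this, hitems, List.map_map]
    rfl
  rw [hvals]
  exact pvSum_counts (PySem.Set.ofList ks) (PySem.Set.nodup_ofList ks)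
    ks (fun k hk => (PySem.Set.mem_ofList (y := k) (xs := ks)).mpr hk)

lemma pvPickCore (ks : List (Option Int)) (ms : List Int) (z : Int)
    (hcnt : ∀ t, ks.count (some t) = ms.count t)
    (hmem : ∀ t, some t ∈ ks ↔ t ∈ ms) :
    (let c := PySem.Dict.counter ks;
     let S := PySem.List.sorted c.keys
       (fun x => toLex ((c.getD x 0 : Int), (match x with | none => z | some v => -v))) true;
     let b0 := PySem.List.pyGetD S 0 none;
     let best := if b0 = none ∧ 1 < S.length then PySem.List.pyGetD S 1 none else b0;
     ((c.values).sum - c.getD best 0, best))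
    = (match PySem.List.max? (PySem.Set.ofList ms) (fun t => toLex ((ms.count t : Int), -t)) with
       | some b => ((ks.length : Int) - ms.count b, some b)
       | none => ((0 : Int), (none : Option Int))) := by
  dsimp only
  have hkeys : (PySem.Dict.counter ks).keys = PySem.Set.ofList ks := PySem.Dict.keys_counter ks
  have hget : ∀ x, (PySem.Dict.counter ks).getD x 0 = (ks.count x : Int) :=
    fun x => PySem.Dict.getD_counter ks x
  set enc : Option Int → Lex (Int × Int) :=
    (fun x => toLex (((PySem.Dict.counter ks).getD x 0 : Int),
      (match x with | none => z | some v => -v))) with henc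
  set keyB : Int → Lex (Int × Int) := (fun t => toLex ((ms.count t : Int), -t)) with hkeyB
  have hencS : ∀ t, enc (some t) = keyB t := by
    intro t
    rw [henc, hkeyB]
    simp only [hget, hcnt]
  by_cases hms : ms = []
  · subst hms
    have hmax : PySem.List.max? (PySem.Set.ofList ([] : List Int)) keyB = none := rfl
    rw [hmax]
    have hall : ∀ x ∈ ks, x = (none : Option Int) := by
      intro x hx
      cases x with
      | none => rfl
      | some t => exact absurd ((hmem t).mp hx) (by simp)
    by_cases hksnil : ks = []
    · subst hksnil
      have h1 : PySem.List.sorted (PySem.Dict.counter ([] : List (Option Int))).keys enc true = [] := rfl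
      simp only [h1]
      decide
    · have hof : PySem.Set.ofList ks = [none] := by
        rw [pvAllNone_ofList ks hall, if_neg hksnil]
      have hS : PySem.List.sorted (PySem.Dict.counter ks).keys enc true = [none] := by
        apply List.perm_singleton.mp
        rw [← hof, ← hkeys]
        exact PySem.List.sorted_perm _ _ _
      simp only [hS]
      have hb0 : PySem.List.pyGetD ([none] : List (Option Int)) 0 none = none := by
        simp [pysem]
      rw [hb0, if_neg (by simp)]
      rw [pvCounter_values_sum, hget]
      have hcn : ks.count none = ks.length := List.count_eq_length.mpr (by
        intro b hb; simpa using (hall b hb).symm)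
      rw [hcn]
      simp
  · have hSetne : PySem.Set.ofList ms ≠ [] := by
      obtain ⟨t, ht⟩ := List.exists_mem_of_ne_nil ms hms
      exact List.ne_nil_of_mem ((PySem.Set.mem_ofList _ _).mpr ht)
    obtain ⟨b, hb⟩ : ∃ b, PySem.List.max? (PySem.Set.ofList ms) keyB = some b := by
      cases h : PySem.List.max? (PySem.Set.ofList ms) keyB with
      | none => exact absurd ((PySem.List.max?_eq_none_iff _ _).mp h) hSetne
      | some b => exact ⟨b, rfl⟩
    rw [hb]
    have hbmem : b ∈ ms := (PySem.Set.mem_ofList _ _).mp (PySem.List.max?_mem hb)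
    have hbmax : ∀ t ∈ ms, keyB t ≤ keyB b := by
      intro t ht
      exact PySem.List.max?_isMax hb _ ((PySem.Set.mem_ofList _ _).mpr ht)
    have huniq : ∀ u, u ∈ ms → (∀ t ∈ ms, keyB t ≤ keyB u) → u = b := by
      intro u hu hmax
      have heq : keyB u = keyB b := le_antisymm (hbmax u hu) (hmax b hbmem)
      rw [hkeyB] at heq
      have h1 := toLex.injective heq
      have h2 : -u = -b := congrArg Prod.snd h1
      omega
    have hkeysne : (PySem.Dict.counter ks).keys ≠ [] := by
      rw [hkeys]
      exact List.ne_nil_of_mem ((PySem.Set.mem_ofList _ _).mpr ((hmem b).mpr hbmem))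
    have hSne : PySem.List.sorted (PySem.Dict.counter ks).keys enc true ≠ [] := by
      rw [Ne, PySem.List.sorted_eq_nil_iff]
      exact hkeysne
    have hperm : (PySem.List.sorted (PySem.Dict.counter ks).keys enc true).Perm (PySem.Set.ofList ks) := by
      rw [← hkeys]
      exact PySem.List.sorted_perm _ _ _
    have hpair : (PySem.List.sorted (PySem.Dict.counter ks).keys enc true).Pairwise
        (fun a b => enc b ≤ enc a) := PySem.List.sorted_pairwise_rev _ _
    have hnodup : (PySem.List.sorted (PySem.Dict.counter ks).keys enc true).Nodup :=
      (hperm.nodup_iff).mpr (PySem.Set.nodup_ofList ks)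
    cases hS : PySem.List.sorted (PySem.Dict.counter ks).keys enc true with
    | nil => exact absurd hS hSne
    | cons m rest =>
      have hheadmax : ∀ y ∈ PySem.Set.ofList ks, enc y ≤ enc m := by
        have hh := PySem.List.key_head_sorted_rev_ge (key := enc)
          (xs := (PySem.Dict.counter ks).keys) hS
        intro y hy
        exact hh y (hkeys ▸ hy)
      rw [hS] at hperm hpair hnodup
      have hmemS : ∀ y, y ∈ PySem.Set.ofList ks ↔ y ∈ m :: rest := fun y => (hperm.mem_iff).symm
      cases m with
      | some u =>
        have hu_ms : u ∈ ms := (hmem u).mp ((PySem.Set.mem_ofList _ _).mp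
          ((hmemS (some u)).mpr List.mem_cons_self))
        have hmax_u : ∀ t ∈ ms, keyB t ≤ keyB u := by
          intro t ht
          have hh := hheadmax (some t) ((PySem.Set.mem_ofList _ _).mpr ((hmem t).mpr ht))
          rwa [hencS, hencS] at hh
        have hub : u = b := huniq u hu_ms hmax_u
        have hb0 : PySem.List.pyGetD (some u :: rest) 0 none = some u := by simp [pysem]
        rw [hb0, if_neg (by simp)]
        rw [pvCounter_values_sum, hget, hcnt, hub]
      | none =>
        have hsbS : some b ∈ none :: rest :=
          (hmemS (some b)).mp ((PySem.Set.mem_ofList _ _).mpr ((hmem b).mpr hbmem))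
        have hsb_rest : some b ∈ rest := by
          rcases List.mem_cons.mp hsbS with h | h
          · exact absurd h (by simp)
          · exact h
        cases rest with
        | nil => simp at hsb_rest
        | cons u' rest' =>
          have hu'ne : u' ≠ none := by
            intro hc
            subst hc
            exact (List.nodup_cons.mp hnodup).1 List.mem_cons_self
          cases u' with
          | none => exact absurd rfl hu'ne
          | some u =>
            have hu_ms : u ∈ ms := (hmem u).mp ((PySem.Set.mem_ofList _ _).mp
              ((hmemS (some u)).mpr (List.mem_cons_of_mem _ List.mem_cons_self)))
            have htailpair : ∀ y ∈ rest', enc y ≤ enc (some u) := by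
              have h1 := (List.pairwise_cons.mp hpair).2
              exact fun y hy => (List.pairwise_cons.mp h1).1 y hy
            have hmax_u : ∀ t ∈ ms, keyB t ≤ keyB u := by
              intro t ht
              have hin : some t ∈ none :: some u :: rest' :=
                (hmemS (some t)).mp ((PySem.Set.mem_ofList _ _).mpr ((hmem t).mpr ht))
              rcases List.mem_cons.mp hin with h | h
              · exact absurd h (by simp)
              · rcases List.mem_cons.mp h with h2 | h2
                · have h3 : t = u := by simpa using h2
                  subst h3
                  exact le_refl _
                · have h4 := htailpair (some t) h2
                  rwa [hencS, hencS] at h4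
            have hub : u = b := huniq u hu_ms hmax_u
            have hb0 : PySem.List.pyGetD (none :: some u :: rest') 0 none = none := by simp [pysem]
            rw [hb0, if_pos (by refine ⟨rfl, ?_⟩; simp), pvPyGetD_one]
            rw [pvCounter_values_sum, hget, hcnt, hub]

lemma pvPick_eq (tm : List Int) (opts : List (Option Nat)) (z : Int) :
    (let ks := opts.map (fun o => o.map (fun q => tm.getD q 0));
     let c := PySem.Dict.counter ks;
     let S := PySem.List.sorted c.keys
       (fun x => toLex ((c.getD x 0 : Int), (match x with | none => z | some v => -v))) true;
     let b0 := PySem.List.pyGetD S 0 none;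
     let best := if b0 = none ∧ 1 < S.length then PySem.List.pyGetD S 1 none else b0;
     ((c.values).sum - c.getD best 0, best))
      = pvPick tm opts.length opts := by
  have hcnt : ∀ t, (opts.map (fun o => o.map (fun q => tm.getD q 0))).count (some t)
      = ((opts.filterMap id).map (fun q => tm.getD q 0)).count t :=
    fun t => pvCount_some (fun q => tm.getD q 0) opts t
  have hmem : ∀ t, some t ∈ opts.map (fun o => o.map (fun q => tm.getD q 0))
      ↔ t ∈ (opts.filterMap id).map (fun q => tm.getD q 0) := by
    intro t
    rw [← List.count_pos_iff, ← List.count_pos_iff, hcnt]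
  have hc := pvPickCore (opts.map (fun o => o.map (fun q => tm.getD q 0)))
    ((opts.filterMap id).map (fun q => tm.getD q 0)) z hcnt hmem
  rw [List.length_map] at hc
  exact hc

-- ---- B-side bridges ----

lemma pvScanTok_eq (s1c : List Char) (tm : List Int) :
    ∀ (cs : List Char) (p : Nat) (d : PySem.Dict Int Int),
    pvScanTok s1c tm cs (p : Int) d
      = ((((pvGMatch s1c cs p).1.filterMap id).map (fun q => tm.getD q 0)).foldl
            (fun d t => d.insert t (d.getD t 0 + 1)) d,
         ((pvGMatch s1c cs p).2 : Int)) := by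
  intro cs
  induction cs with
  | nil => intro p d; simp [pvScanTok, pvGMatch]
  | cons c cs ih =>
    intro p d
    by_cases hg : s1c[p]? = some c
    · have hcond : (PySem.List.pyGet? s1c (p : Int) == some c) = true := by
        simp [PySem.List.pyGet?_natCast, hg]
      have hget : PySem.List.pyGetD tm (p : Int) 0 = tm.getD p 0 := by
        simp [PySem.List.pyGetD_natCast]
      have hcast : ((p : Int) + 1) = ((p + 1 : Nat) : Int) := by push_cast; ring
      simp only [pvScanTok, hcond, if_pos, pvGMatch, if_pos hg, hget, hcast]
      rw [ih]
      simp
    · have hcond : (PySem.List.pyGet? s1c (p : Int) == some c) = false := by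
        simp [PySem.List.pyGet?_natCast, hg]
      simp only [pvScanTok, hcond, Bool.false_eq_true, if_false, pvGMatch, if_neg hg]
      rw [ih]
      simp

lemma pvAlt_fold (s1c : List Char) (tm ign : List Int) :
    ∀ (seq2' : List String) (s : Int) (p : Nat) (m : Int) (out : List (Option Int)),
    (PySem.List.enumerate seq2' s).foldl (fun st q =>
        let dp := if ign.contains q.1 then ((PySem.Dict.empty : PySem.Dict Int Int), st.2.2)
                  else pvScanTok s1c tm q.2.toList st.2.2 PySem.Dict.empty
        match PySem.List.max? dp.1.keys (fun t => toLex (dp.1.getD t 0, -t)) with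
        | some best => (st.1 + (PySem.Str.len q.2 - dp.1.getD best 0), st.2.1 ++ [some best], dp.2)
        | none => (st.1, st.2.1 ++ [(none : Option Int)], dp.2))
      (m, out, (p : Int))
      = (m + (pvRef s1c tm ign seq2' s p).1, out ++ (pvRef s1c tm ign seq2' s p).2.1,
         ((pvRef s1c tm ign seq2' s p).2.2.2 : Int)) := by
  intro seq2'
  induction seq2' with
  | nil =>
    intro s p m out
    simp [PySem.List.enumerate_nil, pvRef]
  | cons t rest ih =>
    intro s p m out
    rw [PySem.List.enumerate_cons]
    rw [List.foldl_cons]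
    by_cases hj : ign.contains s
    · -- ignored token: empty dict, max? over [] is none
      simp only [hj, if_pos, pvRef]
      have hmax : PySem.List.max? (PySem.Dict.empty : PySem.Dict Int Int).keys
          (fun t => toLex ((PySem.Dict.empty : PySem.Dict Int Int).getD t 0, -t)) = none := rfl
      rw [hmax]
      rw [ih (s + 1) p m (out ++ [none])]
      have hpk : pvPick tm (t.toList.map (fun _ => (none : Option Nat))).length
          (t.toList.map (fun _ => (none : Option Nat))) = (0, none) := by
        unfold pvPick
        have hfm : ((t.toList.map (fun _ => (none : Option Nat))).filterMap id) = [] := by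
          simp
        rw [hfm]
        rfl
      rw [hpk]
      refine Prod.ext ?_ (Prod.ext ?_ ?_) <;> simp <;> try ring
    · simp only [hj, Bool.false_eq_true, if_false, pvRef]
      rw [pvScanTok_eq s1c tm t.toList p PySem.Dict.empty]
      have hins : (((pvGMatch s1c t.toList p).1.filterMap id).map (fun q => tm.getD q 0)).foldl
          (fun d t => d.insert t (d.getD t 0 + 1)) PySem.Dict.empty
          = PySem.Dict.counter (((pvGMatch s1c t.toList p).1.filterMap id).map (fun q => tm.getD q 0)) :=
        PySem.Dict.foldl_insert_getD_add_one_eq_counter _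
      rw [hins]
      set ms := ((pvGMatch s1c t.toList p).1.filterMap id).map (fun q => tm.getD q 0) with hms
      have hkeys : (PySem.Dict.counter ms).keys = PySem.Set.ofList ms := PySem.Dict.keys_counter ms
      have hkf : (fun t => toLex ((PySem.Dict.counter ms).getD t 0, -t))
          = (fun t => toLex ((ms.count t : Int), -t)) := by
        funext t
        rw [PySem.Dict.getD_counter]
      rw [hkeys, hkf]
      have hpk : pvPick tm (pvGMatch s1c t.toList p).1.length (pvGMatch s1c t.toList p).1
          = (match PySem.List.max? (PySem.Set.ofList ms) (fun t => toLex ((ms.count t : Int), -t)) with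
             | some b => (((pvGMatch s1c t.toList p).1.length : Int) - ms.count b, some b)
             | none => ((0 : Int), (none : Option Int))) := by
        unfold pvPick
        rw [← hms]
      have hlen : (PySem.Str.len t : Int) = ((pvGMatch s1c t.toList p).1.length : Int) := by
        rw [pvGMatch_length]
        simp [PySem.Str.len_eq]
      cases hmx : PySem.List.max? (PySem.Set.ofList ms) (fun t => toLex ((ms.count t : Int), -t)) with
      | some best =>
        rw [ih (s + 1) (pvGMatch s1c t.toList p).2 (m + (PySem.Str.len t - (PySem.Dict.counter ms).getD best 0)) (out ++ [some best])]
        rw [hpk, hmx]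
        refine Prod.ext ?_ (Prod.ext ?_ ?_)
        · show m + (PySem.Str.len t - (PySem.Dict.counter ms).getD best 0) + _ = _
          rw [PySem.Dict.getD_counter, hlen]
          ring
        · simp
        · rfl
      | none =>
        rw [ih (s + 1) (pvGMatch s1c t.toList p).2 m (out ++ [none])]
        rw [hpk, hmx]
        refine Prod.ext ?_ (Prod.ext ?_ ?_)
        · show m + _ = m + (0 + _)
          ring
        · simp
        · rfl

-- ---- A-side fold assembly ----

lemma pvRef_opts_len (s1c : List Char) (tm ign : List Int) :
    ∀ (seq2' : List String) (s : Int) (p : Nat),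
    (pvRef s1c tm ign seq2' s p).2.2.1.length = seq2'.length := by
  intro seq2'
  induction seq2' with
  | nil => intro s p; simp [pvRef]
  | cons t rest ih => intro s p; simp [pvRef, ih]

lemma pvRef_opts_mem_lt (s1c : List Char) (tm ign : List Int) :
    ∀ (seq2' : List String) (s : Int) (p : Nat) (opts : List (Option Nat)) (q : Nat),
    opts ∈ (pvRef s1c tm ign seq2' s p).2.2.1 → some q ∈ opts → q < s1c.length := by
  intro seq2'
  induction seq2' with
  | nil => intro s p opts q h; simp [pvRef] at h
  | cons t rest ih =>
    intro s p opts q h hq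
    simp only [pvRef, List.mem_cons] at h
    rcases h with h | h
    · by_cases hj : ign.contains s
      · simp only [hj, if_pos] at h
        subst h
        simp at hq
      · simp only [hj, Bool.false_eq_true, if_neg] at h
        subst h
        exact pvGMatch_mem_lt s1c t.toList p q hq
    · exact ih _ _ _ q h hq

lemma pvA_fold (tm : List Int) :
    ∀ (kss : List (List (Option Nat))) (m : Int) (out : List (Option Int)),
    kss.foldl (fun acc opts =>
        (acc.1 + (pvPick tm opts.length opts).1, acc.2 ++ [(pvPick tm opts.length opts).2])) (m, out)
      = (m + (kss.map (fun opts => (pvPick tm opts.length opts).1)).sum,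
         out ++ kss.map (fun opts => (pvPick tm opts.length opts).2)) := by
  intro kss
  induction kss with
  | nil => intro m out; simp
  | cons k ks ih =>
    intro m out
    simp only [List.foldl_cons, ih, List.map_cons, List.sum_cons, Prod.mk.injEq]
    exact ⟨by ring, by simp⟩

lemma pvRef_sum (s1c : List Char) (tm ign : List Int) :
    ∀ (seq2' : List String) (s : Int) (p : Nat),
    (pvRef s1c tm ign seq2' s p).1
        = ((pvRef s1c tm ign seq2' s p).2.2.1.map (fun opts => (pvPick tm opts.length opts).1)).sum
    ∧ (pvRef s1c tm ign seq2' s p).2.1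
        = (pvRef s1c tm ign seq2' s p).2.2.1.map (fun opts => (pvPick tm opts.length opts).2) := by
  intro seq2'
  induction seq2' with
  | nil => intro s p; simp [pvRef]
  | cons t rest ih =>
    intro s p
    simp only [pvRef, List.map_cons, List.sum_cons]
    exact ⟨by rw [(ih _ _).1], by rw [(ih _ _).2]⟩

-- ---- greedy completeness: Pre_'s subsequence condition forces the pointer to the end ----

lemma pvRef_complete (s1c : List Char) (tm ign : List Int) :
    ∀ (seq2' : List String) (s : Int) (p : Nat), p ≤ s1c.length →
    (s1c.drop p).Sublist
      ((PySem.List.enumerate seq2' s).flatMap (fun q => if ign.contains q.1 then [] else q.2.toList)) →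
    (pvRef s1c tm ign seq2' s p).2.2.2 = s1c.length := by
  intro seq2'
  induction seq2' with
  | nil =>
    intro s p hp h
    simp only [PySem.List.enumerate_nil, List.flatMap_nil, List.sublist_nil] at h
    have := List.drop_eq_nil_iff.mp h
    simp [pvRef]
    omega
  | cons t rest ih =>
    intro s p hp h
    rw [PySem.List.enumerate_cons] at h
    simp only [List.flatMap_cons] at h
    by_cases hj : ign.contains s
    · simp only [hj, if_pos, List.nil_append] at h
      simp only [pvRef, hj, if_pos]
      exact ih (s + 1) p hp h
    · simp only [hj, Bool.false_eq_true, if_neg] at h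
      simp only [pvRef, hj, Bool.false_eq_true, if_neg]
      exact ih (s + 1) (pvGMatch s1c t.toList p).2
        (pvGMatch_ptr_le s1c t.toList p hp)
        (pvGMatch_sublist s1c t.toList _ p hp h)

-- ---- main theorems for each port ----

lemma pvA_eq_ref (seq1 seq2 : List String) (seq2_ignored_ids : Option (List Int))
    (hpre : Pre_basic_token_align seq1 seq2 seq2_ignored_ids) :
    basic_token_align seq1 seq2 seq2_ignored_ids
      = ((pvRef (seq1.flatMap (fun t => t.toList)) ((pvCharIdxs seq1).map Prod.fst) (seq2_ignored_ids.getD []) seq2 0 0).1,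
         (pvRef (seq1.flatMap (fun t => t.toList)) ((pvCharIdxs seq1).map Prod.fst) (seq2_ignored_ids.getD []) seq2 0 0).2.1) := by
  obtain ⟨hne, hsub, -⟩ := hpre
  unfold basic_token_align
  dsimp only
  rw [show pvCharIdxs seq2 = (PySem.List.enumerate seq2 0).flatMap (fun p => p.2.toList.map (fun c => (p.1, c))) from rfl]
  have hsnd : (pvCharIdxs seq1).map Prod.snd = seq1.flatMap (fun t => t.toList) :=
    pvCharIdxs_snd seq1 0
  have hfull := pvAlign_full (pvCharIdxs seq1) (seq1.flatMap (fun t => t.toList))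
    ((pvCharIdxs seq1).map Prod.fst) (seq2_ignored_ids.getD []) hsnd seq2 0 0 none
  rw [Nat.cast_zero] at hfull
  have hptr : (pvRef (seq1.flatMap (fun t => t.toList)) ((pvCharIdxs seq1).map Prod.fst)
      (seq2_ignored_ids.getD []) seq2 0 0).2.2.2 = (seq1.flatMap (fun t => t.toList)).length := by
    apply pvRef_complete
    · omega
    · simpa using hsub
  have hlv := pvAlignLoop_lv (pvCharIdxs seq1) (seq2_ignored_ids.getD [])
    ((PySem.List.enumerate seq2 0).flatMap (fun p => p.2.toList.map (fun c => (p.1, c)))) 0 none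
    (le_refl 0) (by simp)
  have hlen1 : (pvCharIdxs seq1).length = (seq1.flatMap (fun t => t.toList)).length :=
    pvCharIdxs_length seq1
  have hlpos : 0 < (seq1.flatMap (fun t => t.toList)).length := List.length_pos_iff.mpr hne
  have heq2 : (pvAlignLoop (pvCharIdxs seq1) (seq2_ignored_ids.getD [])
      ((PySem.List.enumerate seq2 0).flatMap (fun p => p.2.toList.map (fun c => (p.1, c)))) 0 none).2.2
      = some (PySem.List.len (pvCharIdxs seq1) - 1) := by
    rw [hlv.1, hfull.2, hptr]
    rw [if_neg (by push_cast; omega)]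
    simp [PySem.List.len_eq, hlen1]
  rw [if_neg (not_not_intro heq2)]
  rw [hfull.1]
  -- characterize the per-token counters
  have hcount : ∀ i2 : Int, 0 ≤ i2 → i2 < (seq2.length : Int) →
      (((((pvRef (seq1.flatMap (fun t => t.toList)) ((pvCharIdxs seq1).map Prod.fst)
            (seq2_ignored_ids.getD []) seq2 0 0).2.2.1.flatten.map (fun o => o.map (fun q => (q : Int)))).zip
          ((PySem.List.enumerate seq2 0).flatMap (fun p => p.2.toList.map (fun c => (p.1, c))))).foldl
            (fun d p => d.modify p.2.1 PySem.Dict.empty (fun c =>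
              c.modify (Option.map (fun ch => (PySem.List.pyGetD (pvCharIdxs seq1) ch (0, ' ')).1) p.1) 0 (· + 1)))
            ((PySem.List.pyRange 0 (PySem.List.len seq2) 1).foldl
              (fun d i => d.insert i PySem.Dict.empty) PySem.Dict.empty)).getD i2 PySem.Dict.empty)
        = PySem.Dict.counter ((PySem.List.pyGetD (pvRef (seq1.flatMap (fun t => t.toList))
            ((pvCharIdxs seq1).map Prod.fst) (seq2_ignored_ids.getD []) seq2 0 0).2.2.1 i2 []).map
              (fun o => o.map (fun q => ((pvCharIdxs seq1).map Prod.fst).getD q 0))) := by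
    intro i2 h0 hn
    rw [pvGetD_foldl_modify2 (Option.map (fun ch => (PySem.List.pyGetD (pvCharIdxs seq1) ch (0, ' ')).1))]
    rw [pvCounts0_getD]
    rw [show (fun (p : Option Int × (Int × Char)) =>
        Option.map (fun ch => (PySem.List.pyGetD (pvCharIdxs seq1) ch (0, ' ')).1) p.1)
      = (fun (o : Option Int) => Option.map (fun ch => (PySem.List.pyGetD (pvCharIdxs seq1) ch (0, ' ')).1) o)
          ∘ (fun (q : Option Int × (Int × Char)) => q.1) from rfl]
    rw [← List.map_map]
    rw [pvZip_filter]
    rw [if_pos ⟨h0, by push_cast; omega⟩]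
    rw [List.map_map]
    have hklen : (pvRef (seq1.flatMap (fun t => t.toList)) ((pvCharIdxs seq1).map Prod.fst)
        (seq2_ignored_ids.getD []) seq2 0 0).2.2.1.length = seq2.length :=
      pvRef_opts_len _ _ _ seq2 0 0
    have hmemk : (pvRef (seq1.flatMap (fun t => t.toList)) ((pvCharIdxs seq1).map Prod.fst)
        (seq2_ignored_ids.getD []) seq2 0 0).2.2.1.getD (i2 - 0).toNat []
        ∈ (pvRef (seq1.flatMap (fun t => t.toList)) ((pvCharIdxs seq1).map Prod.fst)
        (seq2_ignored_ids.getD []) seq2 0 0).2.2.1 := by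
      have hlt : (i2 - 0).toNat < (pvRef (seq1.flatMap (fun t => t.toList)) ((pvCharIdxs seq1).map Prod.fst)
          (seq2_ignored_ids.getD []) seq2 0 0).2.2.1.length := by
        rw [hklen]; omega
      rw [List.getD_eq_getElem _ _ hlt]
      exact List.getElem_mem hlt
    have hfix : ∀ o ∈ (pvRef (seq1.flatMap (fun t => t.toList)) ((pvCharIdxs seq1).map Prod.fst)
        (seq2_ignored_ids.getD []) seq2 0 0).2.2.1.getD (i2 - 0).toNat [],
        ((fun (o : Option Int) => Option.map (fun ch => (PySem.List.pyGetD (pvCharIdxs seq1) ch (0, ' ')).1) o)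
          ∘ (fun (o : Option Nat) => o.map (fun q => (q : Int)))) o
        = o.map (fun q => ((pvCharIdxs seq1).map Prod.fst).getD q 0) := by
      intro o ho
      cases o with
      | none => rfl
      | some q =>
        have hq : q < (pvCharIdxs seq1).length := by
          have := pvRef_opts_mem_lt (seq1.flatMap (fun t => t.toList)) ((pvCharIdxs seq1).map Prod.fst)
            (seq2_ignored_ids.getD []) seq2 0 0 _ q hmemk ho
          omega
        have hq2 : q < ((pvCharIdxs seq1).map Prod.fst).length := by simpa using hq
        show some ((PySem.List.pyGetD (pvCharIdxs seq1) ((q : Nat) : Int) (0, ' ')).1)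
          = some (((pvCharIdxs seq1).map Prod.fst).getD q 0)
        rw [PySem.List.pyGetD_natCast, List.getD_eq_getElem _ _ hq, List.getD_eq_getElem _ _ hq2]
        simp
    rw [List.map_congr_left hfix]
    rw [← PySem.Dict.counter_eq_foldl]
    rw [PySem.List.pyGetD_of_nonneg _ _ h0, Int.sub_zero]
  -- rewrite the phase-3 loop body token by token
  rw [PySem.List.foldl_congr_mem _ _ (fun (acc : Int × List (Option Int)) (j : Int) =>
      (acc.1 + (pvPick ((pvCharIdxs seq1).map Prod.fst)
          (PySem.List.pyGetD (pvRef (seq1.flatMap (fun t => t.toList)) ((pvCharIdxs seq1).map Prod.fst)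
            (seq2_ignored_ids.getD []) seq2 0 0).2.2.1 j []).length
          (PySem.List.pyGetD (pvRef (seq1.flatMap (fun t => t.toList)) ((pvCharIdxs seq1).map Prod.fst)
            (seq2_ignored_ids.getD []) seq2 0 0).2.2.1 j [])).1,
       acc.2 ++ [(pvPick ((pvCharIdxs seq1).map Prod.fst)
          (PySem.List.pyGetD (pvRef (seq1.flatMap (fun t => t.toList)) ((pvCharIdxs seq1).map Prod.fst)
            (seq2_ignored_ids.getD []) seq2 0 0).2.2.1 j []).length
          (PySem.List.pyGetD (pvRef (seq1.flatMap (fun t => t.toList)) ((pvCharIdxs seq1).map Prod.fst)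
            (seq2_ignored_ids.getD []) seq2 0 0).2.2.1 j [])).2])) _ ?hcongr]
  have hlen2 : PySem.List.len seq2 = PySem.List.len (pvRef (seq1.flatMap (fun t => t.toList))
      ((pvCharIdxs seq1).map Prod.fst) (seq2_ignored_ids.getD []) seq2 0 0).2.2.1 := by
    simp [PySem.List.len_eq, pvRef_opts_len]
  rw [hlen2]
  rw [PySem.List.foldl_pyRange_zero_pyGetD
    ((pvRef (seq1.flatMap (fun t => t.toList)) ((pvCharIdxs seq1).map Prod.fst)
      (seq2_ignored_ids.getD []) seq2 0 0).2.2.1) []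
    (fun (acc : Int × List (Option Int)) (opts : List (Option Nat)) =>
      (acc.1 + (pvPick ((pvCharIdxs seq1).map Prod.fst) opts.length opts).1,
       acc.2 ++ [(pvPick ((pvCharIdxs seq1).map Prod.fst) opts.length opts).2]))
    ((0 : Int), ([] : List (Option Int)))]
  rw [pvA_fold]
  have hsum := pvRef_sum (seq1.flatMap (fun t => t.toList)) ((pvCharIdxs seq1).map Prod.fst)
    (seq2_ignored_ids.getD []) seq2 0 0
  rw [← hsum.1, ← hsum.2]
  simp
  case hcongr =>
    intro acc j hj
    dsimp only
    have hb := (PySem.List.mem_pyRange_one).mp hj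
    have hb2 : j < (seq2.length : Int) := by
      have h2 := hb.2
      simpa [PySem.List.len_eq] using h2
    rw [hcount j hb.1 hb2]
    have hpk := pvPick_eq ((pvCharIdxs seq1).map Prod.fst)
      (PySem.List.pyGetD (pvRef (seq1.flatMap (fun t => t.toList)) ((pvCharIdxs seq1).map Prod.fst)
        (seq2_ignored_ids.getD []) seq2 0 0).2.2.1 j []) (-(PySem.List.len seq1) - 1)
    dsimp only at hpk
    rw [← hpk]

lemma pvB_eq_ref (seq1 seq2 : List String) (seq2_ignored_ids : Option (List Int))
    (hpre : Pre_basic_token_align seq1 seq2 seq2_ignored_ids) :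
    basic_token_align_alt seq1 seq2 seq2_ignored_ids
      = ((pvRef (seq1.flatMap (fun t => t.toList)) ((pvCharIdxs seq1).map Prod.fst) (seq2_ignored_ids.getD []) seq2 0 0).1,
         (pvRef (seq1.flatMap (fun t => t.toList)) ((pvCharIdxs seq1).map Prod.fst) (seq2_ignored_ids.getD []) seq2 0 0).2.1) := by
  obtain ⟨hne, hsub, -⟩ := hpre
  unfold basic_token_align_alt
  dsimp only
  rw [← pvCharIdxs_fst seq1 0]
  rw [show ((PySem.List.enumerate seq1).flatMap (fun p => p.2.toList.map (fun c => (p.1, c)))) = pvCharIdxs seq1 from rfl]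
  have hB := pvAlt_fold (seq1.flatMap (fun t => t.toList)) ((pvCharIdxs seq1).map Prod.fst)
    (seq2_ignored_ids.getD []) seq2 0 0 0 []
  dsimp only at hB
  rw [Nat.cast_zero] at hB
  rw [hB]
  have hptr : (pvRef (seq1.flatMap (fun t => t.toList)) ((pvCharIdxs seq1).map Prod.fst)
      (seq2_ignored_ids.getD []) seq2 0 0).2.2.2 = (seq1.flatMap (fun t => t.toList)).length := by
    apply pvRef_complete
    · omega
    · simpa using hsub
  rw [if_pos ⟨by rw [hptr]; simp [PySem.List.len_eq], hne⟩]
  simp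

-- ===== VERDICT (by name: the statement is the Claim_ definition above) =====
theorem basic_token_align_spec : Claim_equal_basic_token_align := by
  intro seq1 seq2 ign _ hpre
  unfold Spec_basic_token_align
  rw [pvA_eq_ref seq1 seq2 ign hpre, pvB_eq_ref seq1 seq2 ign hpre]
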